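-- pv_equiv track=rewrite | github.com/tniapp/read_quality_control | stage6/quality_metrics.py | repeats_amount
-- ===== SOURCE A (Python) =====
-- def repeats_amount(reads_sequences):
--     repeats_dict = {}
--     repeats_sum = 0
--     for seq in reads_sequences:
--         if seq not in repeats_dict.keys():
--             repeats_dict[seq] = 1
--         else:
--             repeats_dict[seq] += 1
--     for read_number in repeats_dict.values():
--         if read_number > 1:
--             repeats_sum += read_number - 1
--     return repeats_sum
-- ===== SOURCE B (Python) =====
-- def repeats_amount(reads_sequences):
--     seqs = list(reads_sequences)
--     return len(seqs) - len(set(seqs))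
-- ===== Notes on version B (the rewrite author's own statement) =====
-- stated objective: simpler
-- what changed: Replaces the frequency dictionary and the two loops (histogram build, then sum of count-1) with the direct identity total - distinct, computed as len(seqs) - len(set(seqs)).
import Mathlib
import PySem

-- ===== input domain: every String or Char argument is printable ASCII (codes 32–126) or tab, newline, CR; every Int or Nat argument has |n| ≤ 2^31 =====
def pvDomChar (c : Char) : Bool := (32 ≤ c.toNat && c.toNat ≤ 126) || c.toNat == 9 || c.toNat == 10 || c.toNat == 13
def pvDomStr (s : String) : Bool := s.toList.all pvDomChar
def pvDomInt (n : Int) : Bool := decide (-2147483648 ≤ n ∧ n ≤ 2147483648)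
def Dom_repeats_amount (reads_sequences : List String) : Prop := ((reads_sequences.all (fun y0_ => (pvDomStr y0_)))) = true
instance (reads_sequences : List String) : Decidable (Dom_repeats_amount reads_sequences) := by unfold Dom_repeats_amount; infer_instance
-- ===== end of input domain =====

-- B replaces the histogram dict and both loops with the direct identity total − distinct (simpler).

-- ===== PORT A =====
def repeats_amount (reads_sequences : List String) : Int :=
  let repeats_dict : PySem.Dict String Int :=
    reads_sequences.foldl
      (fun d seq =>
        if ¬ d.contains seq then d.insert seq 1
        else d.insert seq (d.getD seq 0 + 1))
      PySem.Dict.empty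
  (PySem.Dict.values repeats_dict).foldl
    (fun repeats_sum read_number =>
      if read_number > 1 then repeats_sum + (read_number - 1) else repeats_sum)
    0

-- ===== PORT B =====
def repeats_amount_alt (reads_sequences : List String) : Int :=
  let seqs := reads_sequences
  (seqs.length : Int) - (PySem.Set.ofList seqs).length

-- ===== PRECONDITION & SPEC =====
def Spec_repeats_amount (reads_sequences : List String) (out : Int) : Prop := out = repeats_amount_alt reads_sequences
instance (reads_sequences : List String) (out : Int) : Decidable (Spec_repeats_amount reads_sequences out) := by unfold Spec_repeats_amount; infer_instance

-- ===== CLAIM (what is proved, stated in full; the proofs are below) =====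
def Claim_equal_repeats_amount : Prop := ∀ (reads_sequences : List String), Dom_repeats_amount reads_sequences → Spec_repeats_amount reads_sequences (repeats_amount reads_sequences)

-- ===== LEMMAS AND PROOFS =====

-- A's counting loop is Counter(xs): both branches are 'insert seq (getD seq 0 + 1)'.
theorem pv_loop_eq_counter (xs : List String) :
    xs.foldl
      (fun d seq =>
        if ¬ d.contains seq then d.insert seq 1
        else d.insert seq (d.getD seq 0 + 1))
      PySem.Dict.empty = PySem.Dict.counter xs := by
  rw [← PySem.Dict.foldl_insert_getD_add_one_eq_counter]
  apply PySem.List.foldl_congr_mem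
  intro d x _
  by_cases h : d.contains x
  · simp [h]
  · have : d.getD x 0 = 0 := PySem.Dict.getD_of_not_contains d 0 (by simpa using h)
    simp [h, this]

-- The distinct elements of xs (PySem.Set.ofList) are a permutation of Mathlib's xs.dedup.
theorem pv_ofList_perm_dedup (xs : List String) : (PySem.Set.ofList xs).Perm xs.dedup := by
  rw [List.perm_ext_iff_of_nodup (PySem.Set.nodup_ofList xs) xs.nodup_dedup]
  intro a
  rw [PySem.Set.mem_ofList, List.mem_dedup]

-- Sum of multiplicities over the distinct elements is the length.
theorem pv_sum_counts (xs : List String) :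
    ((PySem.Set.ofList xs).map (fun k => (xs.count k : Int))).sum = (xs.length : Int) := by
  have hperm := (pv_ofList_perm_dedup xs).map (fun k => (xs.count k : Int))
  rw [hperm.sum_eq]
  have h := List.sum_map_count_dedup_eq_length xs
  have h2 : ((xs.dedup.map (fun k => xs.count k)).sum : Int) = (xs.length : Int) := by
    rw [← h]
  rw [← h2]
  simp [Nat.cast_list_sum, List.map_map, Function.comp_def]

-- summing (f v − 1) over a list is the plain sum minus the length
theorem pv_sum_sub_one {α : Type} (l : List α) (f : α → Int) :
    (l.map (fun v => f v - 1)).sum = (l.map f).sum - (l.length : Int) := by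
  induction l with
  | nil => simp
  | cons x t ih => simp [ih]; ring

theorem pv_main (xs : List String) : repeats_amount xs = repeats_amount_alt xs := by
  simp only [repeats_amount, repeats_amount_alt]
  rw [pv_loop_eq_counter]
  have hvals : (PySem.Dict.values (PySem.Dict.counter xs))
      = (PySem.Set.ofList xs).map (fun k => (xs.count k : Int)) := by
    show ((PySem.Dict.counter xs).items.map (·.2))
        = (PySem.Set.ofList xs).map (fun k => (xs.count k : Int))
    rw [PySem.Dict.items_counter]
    simp [List.map_map, Function.comp]
  rw [hvals]
  -- each count is ≥ 1, so the guarded accumulation is summing (count − 1)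
  have hbody : ((PySem.Set.ofList xs).map (fun k => (xs.count k : Int))).foldl
      (fun s v => if v > 1 then s + (v - 1) else s) 0
      = ((PySem.Set.ofList xs).map (fun k => (xs.count k : Int))).foldl
      (fun s v => s + (v - 1)) 0 := by
    apply PySem.List.foldl_congr_mem
    intro s v hv
    obtain ⟨k, hk, rfl⟩ := List.mem_map.1 hv
    have hk' : k ∈ xs := (PySem.Set.mem_ofList xs k).1 hk
    have h1 : 1 ≤ xs.count k := List.count_pos_iff.2 hk'
    by_cases h : (xs.count k : Int) > 1
    · simp [h]
    · have : (xs.count k : Int) = 1 := by omega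
      simp [this]
  rw [hbody, PySem.List.foldl_add]
  simp only [List.map_map, Function.comp_def, zero_add]
  rw [pv_sum_sub_one (PySem.Set.ofList xs) (fun k => (xs.count k : Int)), pv_sum_counts]

-- ===== VERDICT (by name: the statement is the Claim_ definition above) =====
theorem repeats_amount_spec : Claim_equal_repeats_amount := by
  intro xs _
  unfold Spec_repeats_amount
  exact pv_main xs
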